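-- pv_equiv track=rewrite | github.com/c940606/leetcode | 笔试/英伟达1.py | flipChess
-- ===== SOURCE A (Python) =====
-- def flipChess(A, f):
--     # write code here
--     row = len(A)
--     col = len(A[0])
--     for i, j in f:
--         for x, y in [[-1,0], [1, 0], [0, 1], [0, -1]]:
--             tmp_i = i + x - 1
--             tmp_j = j + y - 1
--             if 0<=tmp_i < row and 0 <= tmp_j < col:
--                 A[tmp_i][tmp_j] = 1 - A[tmp_i][tmp_j]
--     return A
-- ===== SOURCE B (Python) =====
-- def flipChess(A, f):
--     # Parity approach: tally how often each in-bounds cell would be toggled,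
--     # then apply a single toggle to every odd-count cell.
--     # Mutates A in place (same observable effect as the original) and returns it.
--     row = len(A)
--     col = len(A[0])
--     cnt = {}
--     for i, j in f:
--         for r, c in ((i - 2, j - 1), (i, j - 1), (i - 1, j), (i - 1, j - 2)):
--             if 0 <= r < row and 0 <= c < col:
--                 cnt[(r, c)] = cnt.get((r, c), 0) + 1
--     for (r, c), k in cnt.items():
--         if k % 2 == 1:
--             A[r][c] = 1 - A[r][c]
--     return A
-- ===== Notes on version B (the rewrite author's own statement) =====
-- stated objective: alternative
-- what changed: Instead of toggling each cell immediately (possibly many times), B first builds a counter dict of how many times each in-bounds neighbour cell is hit and then makes one pass that toggles exactly the cells with an odd count.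
-- outside the precondition, e.g. on flipChess([[1], []], []): A returns [[1], []], B returns [[1], []]
import Mathlib
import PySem

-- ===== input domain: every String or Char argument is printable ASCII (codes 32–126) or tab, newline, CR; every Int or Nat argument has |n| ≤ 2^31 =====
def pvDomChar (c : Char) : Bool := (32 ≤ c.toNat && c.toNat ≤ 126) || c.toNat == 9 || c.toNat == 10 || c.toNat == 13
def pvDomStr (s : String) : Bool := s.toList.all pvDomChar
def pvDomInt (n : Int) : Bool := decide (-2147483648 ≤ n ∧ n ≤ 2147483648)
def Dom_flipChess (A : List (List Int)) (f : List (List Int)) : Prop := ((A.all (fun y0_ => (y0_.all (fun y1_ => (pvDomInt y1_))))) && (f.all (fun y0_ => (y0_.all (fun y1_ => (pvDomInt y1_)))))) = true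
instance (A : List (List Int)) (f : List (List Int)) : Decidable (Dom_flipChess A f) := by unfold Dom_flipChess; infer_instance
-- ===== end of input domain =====

-- B replaces A's immediate repeated toggling by a count-then-apply-parity pass (same cost, different
-- decomposition).  Both Pythons mutate A in place identically; the ports and proof are about the return value.

-- ===== PORT A =====
-- the Python statement `A[tmp_i][tmp_j] = 1 - A[tmp_i][tmp_j]` (shared by both Pythons verbatim)
def pvToggle (g : List (List Int)) (ti tj : Int) : List (List Int) :=
  let rw := PySem.List.pyGetD g ti []
  PySem.List.pySetD g ti (PySem.List.pySetD rw tj (1 - PySem.List.pyGetD rw tj 0))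

-- the literal offset list [[-1,0],[1,0],[0,1],[0,-1]]
def pvOffsets : List (Int × Int) := [(-1, 0), (1, 0), (0, 1), (0, -1)]

def flipChess (A : List (List Int)) (f : List (List Int)) : List (List Int) :=
  let row : Int := A.length
  let col : Int := (A.headD []).length      -- len(A[0]); Pre_ excludes A = []
  f.foldl (fun g p =>
    let i := PySem.List.pyGetD p 0 0        -- `for i, j in f`; Pre_ demands len(p) = 2
    let j := PySem.List.pyGetD p 1 0
    pvOffsets.foldl (fun g xy =>
      let tmp_i := i + xy.1 - 1
      let tmp_j := j + xy.2 - 1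
      if 0 ≤ tmp_i ∧ tmp_i < row ∧ 0 ≤ tmp_j ∧ tmp_j < col then pvToggle g tmp_i tmp_j else g) g) A

-- ===== PORT B =====
def flipChess_alt (A : List (List Int)) (f : List (List Int)) : List (List Int) :=
  let row : Int := A.length
  let col : Int := (A.headD []).length
  let cnt : PySem.Dict (Int × Int) Int :=
    f.foldl (fun d p =>
      let i := PySem.List.pyGetD p 0 0
      let j := PySem.List.pyGetD p 1 0
      ([(i - 2, j - 1), (i, j - 1), (i - 1, j), (i - 1, j - 2)] : List (Int × Int)).foldl
        (fun d t =>
          if 0 ≤ t.1 ∧ t.1 < row ∧ 0 ≤ t.2 ∧ t.2 < col then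
            d.insert t (d.getD t 0 + 1)
          else d) d) PySem.Dict.empty
  cnt.items.foldl (fun g kv =>
    if PySem.Int.mod kv.2 2 = 1 then pvToggle g kv.1.1 kv.1.2 else g) A

-- ===== PRECONDITION & SPEC =====
-- Pre_ excludes exactly the inputs on which the Python A raises — A = [] (IndexError on A[0]), a flip
-- entry whose length is not 2 (unpacking ValueError) — and, slightly wider, ragged grids with a row
-- shorter than the first row (A raises IndexError there whenever a toggle touches the missing cell;
-- on such grids that no flip touches A still returns, see the cite in claim.json).
def Pre_flipChess (A : List (List Int)) (f : List (List Int)) : Prop :=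
  A ≠ [] ∧ (∀ r ∈ A, (A.headD []).length ≤ r.length) ∧ (∀ p ∈ f, p.length = 2)
instance (A : List (List Int)) (f : List (List Int)) : Decidable (Pre_flipChess A f) := by
  unfold Pre_flipChess; infer_instance

def pvWitness_flipChess : List (List Int) × List (List Int) := ([[0, 1], [1, 0]], [[1, 1], [2, 2]])

def Spec_flipChess (A : List (List Int)) (f : List (List Int)) (out : List (List Int)) : Prop := out = flipChess_alt A f
instance (A : List (List Int)) (f : List (List Int)) (out : List (List Int)) : Decidable (Spec_flipChess A f out) := by unfold Spec_flipChess; infer_instance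

-- ===== CLAIM (what is proved, stated in full; the proofs are below) =====
def Claim_equal_flipChess : Prop := ∀ (A : List (List Int)) (f : List (List Int)), Dom_flipChess A f → Pre_flipChess A f → Spec_flipChess A f (flipChess A f)

-- ===== LEMMAS AND PROOFS =====

-- the list of (in-bounds) toggle targets generated by f, in order
def pvTargets (A : List (List Int)) (f : List (List Int)) : List (Int × Int) :=
  f.flatMap (fun p =>
    pvOffsets.filterMap (fun xy =>
      let tmp_i := PySem.List.pyGetD p 0 0 + xy.1 - 1
      let tmp_j := PySem.List.pyGetD p 1 0 + xy.2 - 1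
      if 0 ≤ tmp_i ∧ tmp_i < (A.length : Int) ∧ 0 ≤ tmp_j ∧ tmp_j < ((A.headD []).length : Int)
      then some (tmp_i, tmp_j) else none))

def pvStep (g : List (List Int)) (t : Int × Int) : List (List Int) := pvToggle g t.1 t.2

lemma pv_foldl_ite_filterMap {β γ δ : Type} (l : List β) (c : β → Prop) [DecidablePred c]
    (m : β → γ) (t : δ → γ → δ) (g : δ) :
    l.foldl (fun g x => if c x then t g (m x) else g) g
      = (l.filterMap (fun x => if c x then some (m x) else none)).foldl t g := by
  induction l generalizing g with
  | nil => rfl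
  | cons x l ih =>
    by_cases h : c x <;> simp [h, ih]

lemma pvTargets_nonneg (A : List (List Int)) (f : List (List Int)) :
    ∀ t ∈ pvTargets A f, 0 ≤ t.1 ∧ 0 ≤ t.2 := by
  intro t ht
  simp only [pvTargets, List.mem_flatMap, List.mem_filterMap] at ht
  obtain ⟨p, _, xy, _, hxy⟩ := ht
  split_ifs at hxy with h
  cases hxy
  exact ⟨h.1, h.2.2.1⟩

lemma pv_outer {δ : Type} (c : List Int → (Int × Int) → Prop) [inst : ∀ p xy, Decidable (c p xy)]
    (m : List Int → (Int × Int) → (Int × Int)) (step : δ → (Int × Int) → δ)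
    (f : List (List Int)) (g : δ) :
    f.foldl (fun g p => pvOffsets.foldl (fun g xy => if c p xy then step g (m p xy) else g) g) g
      = (f.flatMap (fun p =>
          pvOffsets.filterMap (fun xy => if c p xy then some (m p xy) else none))).foldl step g := by
  induction f generalizing g with
  | nil => rfl
  | cons p f ih =>
    rw [List.foldl_cons, List.flatMap_cons, List.foldl_append, ← ih,
        pv_foldl_ite_filterMap pvOffsets (c p) (m p) step g]

lemma flipChess_eq_foldl_targets (A : List (List Int)) (f : List (List Int)) :
    flipChess A f = (pvTargets A f).foldl pvStep A := by
  unfold flipChess pvTargets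
  simp only []
  exact pv_outer
    (fun p xy => 0 ≤ PySem.List.pyGetD p 0 0 + xy.1 - 1 ∧
        PySem.List.pyGetD p 0 0 + xy.1 - 1 < (A.length : Int) ∧
        0 ≤ PySem.List.pyGetD p 1 0 + xy.2 - 1 ∧
        PySem.List.pyGetD p 1 0 + xy.2 - 1 < ((A.headD []).length : Int))
    (fun p xy => (PySem.List.pyGetD p 0 0 + xy.1 - 1, PySem.List.pyGetD p 1 0 + xy.2 - 1))
    pvStep f A

-- B's own target list (precomputed neighbour tuples), and its agreement with A's
def pvTargetsB (A : List (List Int)) (f : List (List Int)) : List (Int × Int) :=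
  f.flatMap (fun p =>
    ([(PySem.List.pyGetD p 0 0 - 2, PySem.List.pyGetD p 1 0 - 1),
      (PySem.List.pyGetD p 0 0, PySem.List.pyGetD p 1 0 - 1),
      (PySem.List.pyGetD p 0 0 - 1, PySem.List.pyGetD p 1 0),
      (PySem.List.pyGetD p 0 0 - 1, PySem.List.pyGetD p 1 0 - 2)] : List (Int × Int)).filterMap
      (fun t =>
        if 0 ≤ t.1 ∧ t.1 < (A.length : Int) ∧ 0 ≤ t.2 ∧ t.2 < ((A.headD []).length : Int)
        then some t else none))

lemma pv_outerB {δ : Type} (L : List Int → List (Int × Int)) (c : (Int × Int) → Prop)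
    [DecidablePred c] (step : δ → (Int × Int) → δ) (f : List (List Int)) (g : δ) :
    f.foldl (fun g p => (L p).foldl (fun g t => if c t then step g t else g) g) g
      = (f.flatMap (fun p => (L p).filterMap (fun t => if c t then some t else none))).foldl step g := by
  induction f generalizing g with
  | nil => rfl
  | cons p f ih =>
    rw [List.foldl_cons, List.flatMap_cons, List.foldl_append, ← ih,
        pv_foldl_ite_filterMap (L p) c (fun t => t) step g]

lemma pvTargetsB_eq (A : List (List Int)) (f : List (List Int)) :
    pvTargetsB A f = pvTargets A f := by
  unfold pvTargetsB pvTargets pvOffsets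
  congr 1
  funext p
  simp only [List.filterMap_cons, List.filterMap_nil]
  rw [show PySem.List.pyGetD p 0 0 + (-1 : Int) - 1 = PySem.List.pyGetD p 0 0 - 2 by ring,
      show PySem.List.pyGetD p 1 0 + (0 : Int) - 1 = PySem.List.pyGetD p 1 0 - 1 by ring,
      show PySem.List.pyGetD p 0 0 + (1 : Int) - 1 = PySem.List.pyGetD p 0 0 by ring,
      show PySem.List.pyGetD p 0 0 + (0 : Int) - 1 = PySem.List.pyGetD p 0 0 - 1 by ring,
      show PySem.List.pyGetD p 1 0 + (1 : Int) - 1 = PySem.List.pyGetD p 1 0 by ring,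
      show PySem.List.pyGetD p 1 0 + (-1 : Int) - 1 = PySem.List.pyGetD p 1 0 - 2 by ring]

-- the counter B builds is the insert-style counter over the same target list
lemma flipChess_alt_cnt (A : List (List Int)) (f : List (List Int)) :
    flipChess_alt A f =
      (PySem.Dict.counter (pvTargets A f)).items.foldl
        (fun g kv => if PySem.Int.mod kv.2 2 = 1 then pvToggle g kv.1.1 kv.1.2 else g) A := by
  unfold flipChess_alt
  simp only []
  rw [← PySem.Dict.foldl_insert_getD_add_one_eq_counter, ← pvTargetsB_eq]
  unfold pvTargetsB
  have h := pv_outerB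
    (fun p => [(PySem.List.pyGetD p 0 0 - 2, PySem.List.pyGetD p 1 0 - 1),
      (PySem.List.pyGetD p 0 0, PySem.List.pyGetD p 1 0 - 1),
      (PySem.List.pyGetD p 0 0 - 1, PySem.List.pyGetD p 1 0),
      (PySem.List.pyGetD p 0 0 - 1, PySem.List.pyGetD p 1 0 - 2)])
    (fun t => 0 ≤ t.1 ∧ t.1 < (A.length : Int) ∧ 0 ≤ t.2 ∧ t.2 < ((A.headD []).length : Int))
    (fun d t => d.insert t (d.getD t 0 + 1)) f (PySem.Dict.empty (κ := Int × Int) (ν := Int))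
  rw [h]

-- shape preservation and cell values, phrased with getD (no embedded proofs)
lemma pvGetD_toNat {α : Type} (xs : List α) {i : Int} (d : α) (h : 0 ≤ i) :
    PySem.List.pyGetD xs i d = xs.getD i.toNat d := by
  obtain ⟨n, rfl⟩ : ∃ n : Nat, i = (n : Int) := ⟨i.toNat, by omega⟩
  rw [PySem.List.pyGetD_natCast]
  simp

lemma pvToggle_length (g : List (List Int)) (ti tj : Int) :
    (pvToggle g ti tj).length = g.length := by
  simp [pvToggle, PySem.List.length_pySetD]

lemma pvToggle_rowlen (g : List (List Int)) (ti tj : Int) (hti : 0 ≤ ti) (r : Nat) :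
    ((pvToggle g ti tj).getD r []).length = (g.getD r []).length := by
  unfold pvToggle
  simp only []
  rw [PySem.List.pySetD_of_nonneg _ _ hti]
  rw [List.getD_eq_getElem?_getD, List.getElem?_set]
  by_cases h1 : ti.toNat = r
  · subst h1
    by_cases h2 : ti.toNat < g.length
    · simp [h2, PySem.List.length_pySetD, pvGetD_toNat g ([] : List Int) hti,
            List.getD_eq_getElem?_getD]
    · simp [h2, List.getD_eq_getElem?_getD]
  · simp only [if_neg h1, List.getD_eq_getElem?_getD]

lemma pvToggle_getD (g : List (List Int)) (ti tj : Int) (hti : 0 ≤ ti) (htj : 0 ≤ tj)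
    (r c : Nat) :
    (((pvToggle g ti tj).getD r []).getD c 0) =
      if ti.toNat = r ∧ tj.toNat = c ∧ r < g.length ∧ c < (g.getD r []).length
      then 1 - (g.getD r []).getD c 0 else (g.getD r []).getD c 0 := by
  unfold pvToggle
  simp only []
  rw [PySem.List.pySetD_of_nonneg _ _ hti, PySem.List.pySetD_of_nonneg _ _ htj,
      pvGetD_toNat g [] hti, pvGetD_toNat _ 0 htj]
  by_cases h1 : ti.toNat = r
  · subst h1
    rw [List.getD_eq_getElem?_getD (l := List.set g _ _), List.getElem?_set, if_pos rfl]
    by_cases h2 : ti.toNat < g.length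
    · rw [if_pos h2, Option.getD_some,
          List.getD_eq_getElem?_getD (l := List.set _ _ _), List.getElem?_set]
      by_cases h3 : tj.toNat = c
      · subst h3
        rw [if_pos rfl]
        by_cases h4 : tj.toNat < (g.getD ti.toNat []).length
        · rw [if_pos h4, Option.getD_some, if_pos ⟨rfl, rfl, h2, h4⟩]
        · rw [if_neg h4, Option.getD_none, if_neg (by tauto),
              List.getD_eq_getElem?_getD (l := g.getD ti.toNat []),
              List.getElem?_eq_none (by omega), Option.getD_none]
      · rw [if_neg h3, ← List.getD_eq_getElem?_getD, if_neg (by tauto)]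
    · rw [if_neg h2, Option.getD_none, if_neg (by tauto)]
      have : g.getD ti.toNat [] = [] := by
        rw [List.getD_eq_getElem?_getD (l := g), List.getElem?_eq_none (by omega), Option.getD_none]
      rw [this]
  · rw [List.getD_eq_getElem?_getD (l := List.set g _ _), List.getElem?_set, if_neg h1,
        ← List.getD_eq_getElem?_getD, if_neg (by tauto)]

lemma foldl_step_length (T : List (Int × Int)) (g : List (List Int)) :
    (T.foldl pvStep g).length = g.length := by
  induction T generalizing g with
  | nil => rfl
  | cons t T ih => simp [List.foldl_cons, ih, pvStep, pvToggle_length]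

lemma foldl_step_rowlen (T : List (Int × Int)) (hT : ∀ t ∈ T, 0 ≤ t.1 ∧ 0 ≤ t.2)
    (g : List (List Int)) (r : Nat) :
    ((T.foldl pvStep g).getD r []).length = (g.getD r []).length := by
  induction T generalizing g with
  | nil => rfl
  | cons t T ih =>
    rw [List.foldl_cons, ih (fun x hx => hT x (List.mem_cons_of_mem _ hx))]
    exact pvToggle_rowlen g t.1 t.2 (hT t List.mem_cons_self).1 r

-- value of the toggle fold at a cell: parity of the number of hits
lemma foldl_step_getD (T : List (Int × Int)) (hT : ∀ t ∈ T, 0 ≤ t.1 ∧ 0 ≤ t.2)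
    (g : List (List Int)) (r c : Nat) :
    (((T.foldl pvStep g).getD r []).getD c 0) =
      if List.count ((r : Int), (c : Int)) T % 2 = 1 ∧ r < g.length ∧ c < (g.getD r []).length
      then 1 - (g.getD r []).getD c 0 else (g.getD r []).getD c 0 := by
  induction T generalizing g with
  | nil => simp
  | cons t T ih =>
    have ht := hT t List.mem_cons_self
    rw [List.foldl_cons, ih (fun x hx => hT x (List.mem_cons_of_mem _ hx))]
    rw [show pvStep g t = pvToggle g t.1 t.2 from rfl, pvToggle_length,
        pvToggle_rowlen g t.1 t.2 ht.1 r, pvToggle_getD g t.1 t.2 ht.1 ht.2 r c]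
    by_cases hm : t = ((r : Int), (c : Int))
    · subst hm
      rw [List.count_cons_self]
      simp only [List.getD_eq_getElem?_getD]
      split_ifs <;> omega
    · rw [List.count_cons_of_ne hm]
      have hcond : ¬ (t.1.toNat = r ∧ t.2.toNat = c ∧ r < g.length ∧
          c < (g.getD r []).length) := by
        rintro ⟨e1, e2, _, _⟩
        exact hm (Prod.ext (by omega) (by omega))
      rw [if_neg hcond]

-- B's item pass is a toggle fold over the odd-count keys
def pvOddKeys (T : List (Int × Int)) : List (Int × Int) :=
  (PySem.Set.ofList T).filterMap
    (fun k => if PySem.Int.mod (List.count k T : Int) 2 = 1 then some k else none)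

lemma flipChess_alt_eq_foldl_odd (A : List (List Int)) (f : List (List Int)) :
    flipChess_alt A f = (pvOddKeys (pvTargets A f)).foldl pvStep A := by
  rw [flipChess_alt_cnt, PySem.Dict.items_counter]
  have h := pv_foldl_ite_filterMap
    ((PySem.Set.ofList (pvTargets A f)).map (fun k => (k, (List.count k (pvTargets A f) : Int))))
    (fun kv => PySem.Int.mod kv.2 2 = 1)
    (fun kv : (Int × Int) × Int => (kv.1.1, kv.1.2)) pvStep A
  have h2 : ((PySem.Set.ofList (pvTargets A f)).map
        (fun k => (k, (List.count k (pvTargets A f) : Int)))).filterMap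
        (fun kv => if PySem.Int.mod kv.2 2 = 1 then some (kv.1.1, kv.1.2) else none)
      = pvOddKeys (pvTargets A f) := by
    unfold pvOddKeys
    rw [List.filterMap_map]
    rfl
  exact h.trans (by rw [h2])

lemma pvMod_two (n : Nat) : PySem.Int.mod (n : Int) 2 = 1 ↔ n % 2 = 1 := by
  rw [PySem.Int.mod_eq_emod_of_pos (by norm_num)]
  omega

lemma pvOddKeys_mem (T : List (Int × Int)) (t : Int × Int) :
    t ∈ pvOddKeys T ↔ List.count t T % 2 = 1 := by
  unfold pvOddKeys
  simp only [List.mem_filterMap]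
  constructor
  · rintro ⟨k, hk, hkt⟩
    split_ifs at hkt with h
    cases hkt
    exact (pvMod_two _).mp h
  · intro h
    refine ⟨t, ?_, ?_⟩
    · rw [PySem.Set.mem_ofList]
      have : List.count t T ≠ 0 := by omega
      exact List.count_pos_iff.mp (Nat.pos_of_ne_zero this)
    · rw [if_pos ((pvMod_two _).mpr h)]

lemma pvOddKeys_nodup (T : List (Int × Int)) : (pvOddKeys T).Nodup := by
  apply List.Nodup.filterMap _ (PySem.Set.nodup_ofList T)
  intro a a' b hb hb'
  split_ifs at hb hb' <;> simp_all

lemma pvOddKeys_count (T : List (Int × Int)) (t : Int × Int) :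
    List.count t (pvOddKeys T) = if List.count t T % 2 = 1 then 1 else 0 := by
  by_cases h : List.count t T % 2 = 1
  · rw [if_pos h]
    exact List.count_eq_one_of_mem (pvOddKeys_nodup T) ((pvOddKeys_mem T t).mpr h)
  · rw [if_neg h, List.count_eq_zero]
    intro hmem
    exact h ((pvOddKeys_mem T t).mp hmem)

-- membership in pvOddKeys carries nonnegativity over
lemma pvOddKeys_nonneg (T : List (Int × Int)) (hT : ∀ t ∈ T, 0 ≤ t.1 ∧ 0 ≤ t.2) :
    ∀ t ∈ pvOddKeys T, 0 ≤ t.1 ∧ 0 ≤ t.2 := by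
  intro t ht
  have := (pvOddKeys_mem T t).mp ht
  have hmem : t ∈ T := List.count_pos_iff.mp (Nat.pos_of_ne_zero (by omega))
  exact hT t hmem

lemma pvGetElem?_eq_some_getD {α : Type} (l : List α) (d : α) {n : Nat} (h : n < l.length) :
    l[n]? = some (l.getD n d) := by
  rw [List.getElem?_eq_getElem h, List.getD_eq_getElem l d h]

-- ===== VERDICT (by name: the statement is the Claim_ definition above) =====
theorem flipChess_spec : Claim_equal_flipChess := by
  intro A f _ _
  unfold Spec_flipChess
  rw [flipChess_eq_foldl_targets, flipChess_alt_eq_foldl_odd]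
  set T := pvTargets A f with hTdef
  have hT := pvTargets_nonneg A f
  have hO := pvOddKeys_nonneg T hT
  apply List.ext_getElem?
  intro r
  by_cases hr : r < A.length
  · rw [pvGetElem?_eq_some_getD _ ([] : List Int) (by rw [foldl_step_length]; exact hr),
        pvGetElem?_eq_some_getD _ ([] : List Int) (by rw [foldl_step_length]; exact hr)]
    congr 1
    apply List.ext_getElem?
    intro c
    by_cases hc : c < (A.getD r []).length
    · rw [pvGetElem?_eq_some_getD _ (0 : Int) (by rw [foldl_step_rowlen T hT A r]; exact hc),
          pvGetElem?_eq_some_getD _ (0 : Int) (by rw [foldl_step_rowlen (pvOddKeys T) hO A r]; exact hc)]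
      congr 1
      rw [foldl_step_getD T hT A r c, foldl_step_getD (pvOddKeys T) hO A r c, pvOddKeys_count]
      by_cases hp : List.count ((r : Int), (c : Int)) T % 2 = 1 <;> simp [hp, hr]
    · rw [List.getElem?_eq_none (by rw [foldl_step_rowlen T hT A r]; omega),
          List.getElem?_eq_none (by rw [foldl_step_rowlen (pvOddKeys T) hO A r]; omega)]
  · rw [List.getElem?_eq_none (by rw [foldl_step_length]; omega),
        List.getElem?_eq_none (by rw [foldl_step_length]; omega)]
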